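-- pv_equiv track=rewrite | github.com/Barq-dps/PQGen | backend/pdf_content_analyzer.py | determine_complexity_level
-- ===== SOURCE A (Python) =====
-- def determine_complexity_level(text: str) -> str:
--     """
--     Determine the complexity level of the content
--     """
--     text_lower = text.lower()
--
--     # Complexity indicators
--     beginner_indicators = [
--         'introduction', 'basic', 'fundamentals', 'getting started',
--         'hello world', 'first program', 'simple', 'easy'
--     ]
--
--     intermediate_indicators = [
--         'intermediate', 'advanced', 'complex', 'algorithm',
--         'data structure', 'object oriented', 'inheritance', 'polymorphism'
--     ]
--
--     advanced_indicators = [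
--         'expert', 'professional', 'optimization', 'performance',
--         'design pattern', 'architecture', 'framework', 'concurrent'
--     ]
--
--     beginner_score = sum(1 for indicator in beginner_indicators
--                         if indicator in text_lower)
--     intermediate_score = sum(1 for indicator in intermediate_indicators
--                            if indicator in text_lower)
--     advanced_score = sum(1 for indicator in advanced_indicators
--                         if indicator in text_lower)
--
--     if advanced_score >= 2:
--         return 'hard'
--     elif intermediate_score >= 2:
--         return 'medium'
--     elif beginner_score >= 2:
--         return 'easy'
--     else:
--         return 'medium'  # Default to medium
-- ===== SOURCE B (Python) =====
-- _LADDER = [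
--     ('hard', ['expert', 'professional', 'optimization', 'performance',
--               'design pattern', 'architecture', 'framework', 'concurrent']),
--     ('medium', ['intermediate', 'advanced', 'complex', 'algorithm',
--                 'data structure', 'object oriented', 'inheritance', 'polymorphism']),
--     ('easy', ['introduction', 'basic', 'fundamentals', 'getting started',
--               'hello world', 'first program', 'simple', 'easy']),
-- ]
--
--
-- def _has_two(keywords, text_lower):
--     """True iff at least two of the keywords occur in text_lower.
--     Recursive early-exit: find the first hit, then it suffices that ANY
--     later keyword also hits -- no counter is ever maintained."""
--     if not keywords:
--         return False
--     if keywords[0] in text_lower: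
--         return any(k in text_lower for k in keywords[1:])
--     return _has_two(keywords[1:], text_lower)
--
--
-- def determine_complexity_level(text: str) -> str:
--     """
--     Determine the complexity level of the content
--     """
--     text_lower = text.lower()
--     for level, keywords in _LADDER:
--         if _has_two(keywords, text_lower):
--             return level
--     return 'medium'  # Default to medium
-- ===== Notes on version B (the rewrite author's own statement) =====
-- stated objective: alternative
-- what changed: Replaces the three full counting passes and the integer-threshold ladder with a priority walk over (level, keywords) pairs using a recursive early-exit predicate _has_two (first hit, then 'any' over the remaining keywords) -- no scores are ever computed.
import Mathlib
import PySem

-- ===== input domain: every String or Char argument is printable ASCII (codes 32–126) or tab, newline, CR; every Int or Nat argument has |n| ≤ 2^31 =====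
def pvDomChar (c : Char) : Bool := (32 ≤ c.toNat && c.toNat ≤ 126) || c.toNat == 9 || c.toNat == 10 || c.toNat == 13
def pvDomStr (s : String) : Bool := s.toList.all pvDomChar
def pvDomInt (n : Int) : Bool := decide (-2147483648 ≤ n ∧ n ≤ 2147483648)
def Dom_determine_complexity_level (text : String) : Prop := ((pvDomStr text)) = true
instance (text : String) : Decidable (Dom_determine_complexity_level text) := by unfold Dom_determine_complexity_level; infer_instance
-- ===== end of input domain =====

-- B replaces A's three counting passes and integer thresholds with a priority walk
-- over (level, keywords) pairs using a recursive early-exit two-hits predicate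
-- (objective: alternative, same cost).

-- ===== PORT A =====
def determine_complexity_level (text : String) : String :=
  let text_lower := PySem.Str.lower text
  let beginner_indicators : List String :=
    ["introduction", "basic", "fundamentals", "getting started",
     "hello world", "first program", "simple", "easy"]
  let intermediate_indicators : List String :=
    ["intermediate", "advanced", "complex", "algorithm",
     "data structure", "object oriented", "inheritance", "polymorphism"]
  let advanced_indicators : List String :=
    ["expert", "professional", "optimization", "performance",
     "design pattern", "architecture", "framework", "concurrent"]
  let beginner_score : Int :=
    (beginner_indicators.map (fun indicator =>
      if PySem.Str.isIn indicator text_lower then (1 : Int) else 0)).sum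
  let intermediate_score : Int :=
    (intermediate_indicators.map (fun indicator =>
      if PySem.Str.isIn indicator text_lower then (1 : Int) else 0)).sum
  let advanced_score : Int :=
    (advanced_indicators.map (fun indicator =>
      if PySem.Str.isIn indicator text_lower then (1 : Int) else 0)).sum
  if advanced_score ≥ 2 then "hard"
  else if intermediate_score ≥ 2 then "medium"
  else if beginner_score ≥ 2 then "easy"
  else "medium"

-- ===== PORT B =====
def dclLadder : List (String × List String) :=
  [("hard", ["expert", "professional", "optimization", "performance",
             "design pattern", "architecture", "framework", "concurrent"]),
   ("medium", ["intermediate", "advanced", "complex", "algorithm",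
               "data structure", "object oriented", "inheritance", "polymorphism"]),
   ("easy", ["introduction", "basic", "fundamentals", "getting started",
             "hello world", "first program", "simple", "easy"])]

-- _has_two: first hit, then `any` over the remaining keywords; no counter.
def dclHasTwo (keywords : List String) (text_lower : String) : Bool :=
  match keywords with
  | [] => false
  | k :: rest =>
    if PySem.Str.isIn k text_lower then rest.any (fun x => PySem.Str.isIn x text_lower)
    else dclHasTwo rest text_lower

-- the for-loop with early return over the ladder
def dclWalk (ladder : List (String × List String)) (text_lower : String) : String :=
  match ladder with
  | [] => "medium"
  | (level, keywords) :: rest =>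
    if dclHasTwo keywords text_lower then level else dclWalk rest text_lower

def determine_complexity_level_alt (text : String) : String :=
  let text_lower := PySem.Str.lower text
  dclWalk dclLadder text_lower

-- ===== PRECONDITION & SPEC =====
def Spec_determine_complexity_level (text : String) (out : String) : Prop := out = determine_complexity_level_alt text
instance (text : String) (out : String) : Decidable (Spec_determine_complexity_level text out) := by unfold Spec_determine_complexity_level; infer_instance

-- ===== CLAIM (what is proved, stated in full; the proofs are below) =====
def Claim_equal_determine_complexity_level : Prop := ∀ (text : String), Dom_determine_complexity_level text → Spec_determine_complexity_level text (determine_complexity_level text)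

-- ===== LEMMAS AND PROOFS =====

-- the early-exit predicate is exactly "at least two keywords match"
theorem dclHasTwo_eq (keywords : List String) (t : String) :
    dclHasTwo keywords t =
      decide (2 ≤ keywords.countP (fun k => PySem.Str.isIn k t)) := by
  induction keywords with
  | nil => simp [dclHasTwo]
  | cons k rest ih =>
    simp only [dclHasTwo, List.countP_cons]
    by_cases h : PySem.Str.isIn k t = true
    · rw [if_pos h, if_pos h, Bool.eq_iff_iff]
      simp only [List.any_eq_true, decide_eq_true_eq]
      rw [← List.countP_pos_iff]
      omega
    · rw [if_neg h, if_neg h, Nat.add_zero]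
      exact ih

-- ===== VERDICT (by name: the statement is the Claim_ definition above) =====
theorem determine_complexity_level_spec : Claim_equal_determine_complexity_level := by
  intro text _
  unfold Spec_determine_complexity_level determine_complexity_level determine_complexity_level_alt
  simp only [PySem.List.sum_map_ite_one_zero, dclLadder, dclWalk, dclHasTwo_eq]
  set t := PySem.Str.lower text
  set cb := List.countP (fun k => PySem.Str.isIn k t)
      ["introduction", "basic", "fundamentals", "getting started",
       "hello world", "first program", "simple", "easy"] with hcb
  set ci := List.countP (fun k => PySem.Str.isIn k t)
      ["intermediate", "advanced", "complex", "algorithm",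
       "data structure", "object oriented", "inheritance", "polymorphism"] with hci
  set ca := List.countP (fun k => PySem.Str.isIn k t)
      ["expert", "professional", "optimization", "performance",
       "design pattern", "architecture", "framework", "concurrent"] with hca
  by_cases ha : 2 ≤ ca <;> by_cases hi : 2 ≤ ci <;> by_cases hb : 2 ≤ cb <;>
    simp [ha, hi, hb]
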